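-- pv_equiv track=rewrite | github.com/therealnemethmate/ultrabalaton-calc | extract_kalk.py | _block_count
-- ===== SOURCE A (Python) =====
-- from typing import Any, Dict, List, Optional
--
-- def _block_count(segment_ids: List[int]) -> int:
--     """Count contiguous blocks assuming segment IDs are sequential (1..N)."""
--     if not segment_ids:
--         return 0
--     ids = sorted(segment_ids)
--     blocks = 1
--     for a, b in zip(ids, ids[1:]):
--         if b != a + 1:
--             blocks += 1
--     return blocks
-- ===== SOURCE B (Python) =====
-- def _block_count(segment_ids):
--     """Count contiguous blocks: one block per element that has no predecessor,
--     counting duplicates as their own blocks (as sorting-adjacent duplicates do)."""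
--     s = set(segment_ids)
--     return len(segment_ids) - sum(1 for v in s if v + 1 in s)
-- ===== Notes on version B (the rewrite author's own statement) =====
-- stated objective: alternative
-- what changed: Replaces sort-then-scan-adjacent-pairs with a single set build: the answer is n minus the number of distinct values v whose successor v+1 is also present.
import Mathlib
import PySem

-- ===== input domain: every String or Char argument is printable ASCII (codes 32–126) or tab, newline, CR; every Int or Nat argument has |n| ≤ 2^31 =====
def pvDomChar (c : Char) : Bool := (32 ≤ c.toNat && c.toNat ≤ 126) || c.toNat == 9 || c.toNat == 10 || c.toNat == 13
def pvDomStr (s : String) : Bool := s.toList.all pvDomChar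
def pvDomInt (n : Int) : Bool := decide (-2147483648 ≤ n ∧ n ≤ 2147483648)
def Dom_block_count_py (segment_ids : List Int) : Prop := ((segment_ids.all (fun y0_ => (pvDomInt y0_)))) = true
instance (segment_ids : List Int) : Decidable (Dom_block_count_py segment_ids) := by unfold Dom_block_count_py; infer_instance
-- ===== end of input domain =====

-- B changes the algorithm: instead of sorting and scanning adjacent pairs, it builds the
-- set once and returns n minus the number of distinct values whose successor is present.

-- ===== PORT A =====
-- literal port of A: sort, then fold over zip(ids, ids[1:]) starting from blocks = 1
def block_count_py (segment_ids : List Int) : Int :=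
  if segment_ids = [] then 0
  else
    let ids := PySem.List.sorted segment_ids (fun x => x) false
    (ids.zip (PySem.List.slice ids (some 1) none)).foldl
      (fun blocks ab => if ab.2 ≠ ab.1 + 1 then blocks + 1 else blocks) 1

-- ===== PORT B =====
-- literal port of B: s = set(segment_ids); len(segment_ids) - sum(1 for v in s if v+1 in s)
def block_count_py_alt (segment_ids : List Int) : Int :=
  let s := PySem.Set.ofList segment_ids
  (segment_ids.length : Int) -
    s.foldl (fun acc v => if PySem.Set.contains s (v + 1) then acc + 1 else acc) 0

-- ===== PRECONDITION & SPEC =====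
def Spec_block_count_py (segment_ids : List Int) (out : Int) : Prop := out = block_count_py_alt segment_ids
instance (segment_ids : List Int) (out : Int) : Decidable (Spec_block_count_py segment_ids out) := by unfold Spec_block_count_py; infer_instance

-- ===== CLAIM (what is proved, stated in full; the proofs are below) =====
def Claim_equal_block_count_py : Prop := ∀ (segment_ids : List Int), Dom_block_count_py segment_ids → Spec_block_count_py segment_ids (block_count_py segment_ids)

-- ===== LEMMAS AND PROOFS =====

-- the successor-pair count over a list's Finset of values
def succCard (L : List Int) : ℕ :=
  (L.toFinset.filter (fun v => v + 1 ∈ L.toFinset)).card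

-- A's fold adds 1 per zip pair with b ≠ a+1
theorem foldA_eq (ps : List (Int × Int)) (init : Int) :
    ps.foldl (fun blocks ab => if ab.2 ≠ ab.1 + 1 then blocks + 1 else blocks) init
      = init + (ps.countP (fun ab => decide (ab.2 ≠ ab.1 + 1)) : ℤ) := by
  induction ps generalizing init with
  | nil => simp
  | cons p t ih =>
    simp only [List.foldl_cons, List.countP_cons, ih]
    by_cases h : p.2 = p.1 + 1
    · rw [if_neg (by simp [h]), if_neg (by simp [h])]; push_cast; ring
    · rw [if_pos h, if_pos (by simp [h])]; push_cast; ring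

-- B's fold counts the set elements whose successor is in the set
theorem foldB_eq (s : List Int) (t : List Int) (init : Int) :
    s.foldl (fun acc v => if PySem.Set.contains t (v + 1) then acc + 1 else acc) init
      = init + (s.countP (fun v => PySem.Set.contains t (v + 1)) : ℤ) := by
  induction s generalizing init with
  | nil => simp
  | cons a s ih =>
    simp only [List.foldl_cons, List.countP_cons, ih]
    by_cases h : PySem.Set.contains t (a + 1) = true
    · rw [if_pos h, if_pos h]; push_cast; ring
    · rw [if_neg h, if_neg h]; push_cast; ring

-- the key combinatorial fact: in a weakly sorted list the number of adjacent pairs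
-- (a, b) with b = a + 1 equals the number of distinct values whose successor occurs
theorem sorted_pairs_eq_succCard (L : List Int) (h : L.Pairwise (· ≤ ·)) :
    (L.zip L.tail).countP (fun ab => decide (ab.2 = ab.1 + 1)) = succCard L := by
  classical
  induction L with
  | nil => simp [succCard]
  | cons a t ih =>
    match t with
    | [] =>
      simp only [List.tail_cons, List.zip_nil_right, List.countP_nil, succCard]
      rw [show (([a] : List Int).toFinset) = {a} from by simp, Finset.filter_singleton,
        if_neg (by simp only [Finset.mem_singleton]; omega)]
      simp
    | b :: t' =>
      have hab : a ≤ b := (List.pairwise_cons.mp h).1 b (by simp)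
      have ht : (b :: t').Pairwise (· ≤ ·) := (List.pairwise_cons.mp h).2
      have hble : ∀ x ∈ (b :: t'), b ≤ x := by
        intro x hx
        rcases List.mem_cons.mp hx with rfl | hx'
        · exact le_refl _
        · exact (List.pairwise_cons.mp ht).1 x hx'
      have ihv := ih ht
      simp only [List.tail_cons] at ihv
      have hz : ((a :: b :: t').zip (b :: t')).countP (fun ab => decide (ab.2 = ab.1 + 1))
          = ((if b = a + 1 then 1 else 0) + ((b :: t').zip t').countP (fun ab => decide (ab.2 = ab.1 + 1))) := by
        simp only [List.zip_cons_cons, List.countP_cons]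
        by_cases hb : b = a + 1 <;> simp [hb] <;> try omega
      have hfin : (a :: b :: t').toFinset = insert a (b :: t').toFinset := by simp
      show ((a :: b :: t').zip ((a :: b :: t').tail)).countP _ = _
      simp only [List.tail_cons]
      rw [hz, ihv]
      by_cases hdup : a = b
      · -- duplicate: the pair does not fire (b = a), and the value set is unchanged
        have hne : ¬ b = a + 1 := by omega
        have hmem : a ∈ (b :: t').toFinset := by simp [hdup]
        have hset : (a :: b :: t').toFinset = (b :: t').toFinset := by
          rw [hfin, Finset.insert_eq_self.mpr hmem]
        rw [if_neg hne]
        unfold succCard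
        rw [hset]
        omega
      · have halt : a < b := lt_of_le_of_ne hab hdup
        have hanotin : a ∉ (b :: t').toFinset := by
          simp only [List.mem_toFinset]
          intro hmem
          exact absurd (hble a hmem) (not_le.mpr halt)
        -- for values of b :: t' the successor test ignores the inserted a
        have hcong : (b :: t').toFinset.filter (fun v => v + 1 ∈ insert a (b :: t').toFinset)
            = (b :: t').toFinset.filter (fun v => v + 1 ∈ (b :: t').toFinset) := by
          apply Finset.filter_congr
          intro v hv
          constructor
          · intro h1
            rcases Finset.mem_insert.mp h1 with h2 | h2
            · exfalso; have := hble v (List.mem_toFinset.mp hv); omega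
            · exact h2
          · exact fun h2 => Finset.mem_insert_of_mem h2
        by_cases hb : b = a + 1
        · -- successor pair: one extra pair, and a enters the filtered set (a+1 = b occurs)
          rw [if_pos hb]
          unfold succCard
          rw [hfin, Finset.filter_insert,
            if_pos (show a + 1 ∈ insert a (b :: t').toFinset from
              Finset.mem_insert_of_mem (by simp [← hb])),
            hcong,
            Finset.card_insert_of_notMem (fun hmem => hanotin (Finset.mem_filter.mp hmem).1)]
          omega
        · -- gap: the pair does not fire and a has no successor present
          rw [if_neg hb]
          unfold succCard
          rw [hfin, Finset.filter_insert,
            if_neg (show a + 1 ∉ insert a (b :: t').toFinset from by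
              intro h1
              rcases Finset.mem_insert.mp h1 with h2 | h2
              · omega
              · have := hble _ (List.mem_toFinset.mp h2); omega),
            hcong]
          omega

-- countP over a nodup list is the card of the filtered Finset
theorem countP_nodup_eq_card (l : List Int) (hl : l.Nodup) (p : Int → Bool) :
    l.countP p = (l.toFinset.filter (fun v => p v = true)).card := by
  classical
  rw [List.countP_eq_length_filter, ← List.toFinset_card_of_nodup (hl.filter p),
    List.toFinset_filter]

-- ===== VERDICT (by name: the statement is the Claim_ definition above) =====
theorem block_count_py_spec : Claim_equal_block_count_py := by
  intro xs _
  show block_count_py xs = block_count_py_alt xs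
  classical
  set s := PySem.Set.ofList xs with hs
  have hBnodup : s.Nodup := PySem.Set.nodup_ofList xs
  have hBmem : s.toFinset = xs.toFinset := by
    ext v; simp [List.mem_toFinset, hs, PySem.Set.mem_ofList]
  have hB : block_count_py_alt xs
      = (xs.length : ℤ) - (s.countP (fun v => PySem.Set.contains s (v + 1)) : ℤ) := by
    have hrfl : block_count_py_alt xs
        = (xs.length : ℤ) - (PySem.Set.ofList xs).foldl
            (fun acc v => if PySem.Set.contains (PySem.Set.ofList xs) (v + 1) then acc + 1 else acc) 0 := rfl
    rw [hrfl, foldB_eq, ← hs]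
    omega
  rcases eq_or_ne xs [] with hnil | hnil
  · subst hnil; simp [block_count_py, hB, hs]
  · -- A's value: 1 + (number of adjacent sorted pairs that are NOT successors)
    set ids := PySem.List.sorted xs (fun x => x) false with hids
    have hperm : ids.Perm xs := PySem.List.sorted_perm xs (fun x => x) false
    have hpw : ids.Pairwise (· ≤ ·) := PySem.List.sorted_pairwise xs (fun x => x)
    have hidsne : ids ≠ [] := by
      intro hn
      have hlen0 := hperm.length_eq
      rw [hn] at hlen0
      exact hnil (List.length_eq_zero_iff.mp hlen0.symm)
    have hslice : PySem.List.slice ids (some 1) none = ids.tail := by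
      have := PySem.List.slice_from_natCast (xs := ids) (a := 1)
      simpa [List.drop_one] using this
    have hA : block_count_py xs
        = 1 + ((ids.zip ids.tail).countP (fun ab => decide (ab.2 ≠ ab.1 + 1)) : ℤ) := by
      have hrflA : block_count_py xs = ((PySem.List.sorted xs (fun x => x) false).zip
          (PySem.List.slice (PySem.List.sorted xs (fun x => x) false) (some 1) none)).foldl
          (fun blocks ab => if ab.2 ≠ ab.1 + 1 then blocks + 1 else blocks) 1 := by
        unfold block_count_py
        rw [if_neg hnil]
      rw [hrflA, ← hids, hslice, foldA_eq]
    -- split the n-1 zip pairs into successor and non-successor pairs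
    have hlen : (ids.zip ids.tail).length = ids.length - 1 := by
      rw [List.length_zip, List.length_tail]
      omega
    have hcount : (ids.zip ids.tail).countP (fun ab => decide (ab.2 ≠ ab.1 + 1))
        + (ids.zip ids.tail).countP (fun ab => decide (ab.2 = ab.1 + 1))
        = ids.length - 1 := by
      rw [← hlen]
      have hall := List.length_eq_countP_add_countP (l := ids.zip ids.tail)
        (p := fun ab => decide (ab.2 = ab.1 + 1))
      have hswap : (ids.zip ids.tail).countP (fun ab => decide (ab.2 ≠ ab.1 + 1))
          = (ids.zip ids.tail).countP (fun ab => ¬ (decide (ab.2 = ab.1 + 1) = true)) := by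
        apply List.countP_congr
        intro ab _
        by_cases hcase : ab.2 = ab.1 + 1 <;> simp [hcase]
      omega
    -- the combinatorial identity, transported to B's set
    have hkey : (ids.zip ids.tail).countP (fun ab => decide (ab.2 = ab.1 + 1)) = succCard ids :=
      sorted_pairs_eq_succCard ids hpw
    have hsfin : ids.toFinset = s.toFinset := by
      rw [hBmem]
      ext v
      simp [List.mem_toFinset, hperm.mem_iff]
    have hBcount : s.countP (fun v => PySem.Set.contains s (v + 1)) = succCard ids := by
      rw [countP_nodup_eq_card s hBnodup]
      unfold succCard
      rw [hsfin]
      apply congrArg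
      apply Finset.filter_congr
      intro v _
      simp [PySem.Set.contains, List.mem_toFinset]
    have hlpos : 0 < ids.length := List.length_pos_iff.mpr hidsne
    have hlxs : ids.length = xs.length := hperm.length_eq
    rw [hA, hB, hBcount, ← hkey]
    omega
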